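-- pv_equiv track=rewrite | github.com/rowlowe123/sample-code | util/lucky_15_analysis.py | sum_lucky
-- ===== SOURCE A (Python) =====
-- def sum_lucky(leg_dict, winners=4):
--     if not leg_dict:
--         return 0
--     total = 0
--     # Get records up to winners
--     for i in range(1, winners + 1):
--         if leg_dict.get(i):
--             total += leg_dict[i]
--     return total
-- ===== SOURCE B (Python) =====
-- def sum_lucky(leg_dict, winners=4):
--     total = 0
--     for k, v in leg_dict.items():
--         if k in range(1, winners + 1) and v:
--             total += v
--     return total
-- ===== Notes on version B (the rewrite author's own statement) =====
-- stated objective: simpler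
-- what changed: B replaces A's probing of indices 1..winners with dict lookups by a single pass over the dict's items, filtering each (k, v) by range membership and truthiness; the empty-dict guard disappears.
import Mathlib
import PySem

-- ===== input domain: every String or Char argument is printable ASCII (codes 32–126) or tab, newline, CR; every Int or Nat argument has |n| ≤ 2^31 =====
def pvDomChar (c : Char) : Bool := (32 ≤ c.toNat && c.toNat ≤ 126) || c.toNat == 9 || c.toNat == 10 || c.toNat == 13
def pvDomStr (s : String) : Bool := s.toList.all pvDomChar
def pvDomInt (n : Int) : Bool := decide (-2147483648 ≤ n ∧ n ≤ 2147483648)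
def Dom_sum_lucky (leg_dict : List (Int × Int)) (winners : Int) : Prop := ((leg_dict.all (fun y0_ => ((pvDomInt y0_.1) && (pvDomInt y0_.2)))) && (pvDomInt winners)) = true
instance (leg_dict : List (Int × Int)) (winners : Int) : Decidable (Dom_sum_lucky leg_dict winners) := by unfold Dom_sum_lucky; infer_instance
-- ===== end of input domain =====

-- B sums matching items in ONE pass over the dict's items instead of probing indices 1..winners; objective: simpler (no index probing, no empty-dict guard).

-- ===== PORT A =====
-- A: guard on empty dict, then for i in range(1, winners+1): if leg_dict.get(i): total += leg_dict[i]
def sum_lucky (leg_dict : List (Int × Int)) (winners : Int) : Int :=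
  if leg_dict = [] then 0
  else
    (PySem.List.pyRange 1 (winners + 1) 1).foldl
      (fun total i =>
        match leg_dict.lookup i with
        | some v => if v ≠ 0 then total + v else total
        | none => total) 0

-- ===== PORT B =====
-- B: one pass over the items; keep (k, v) when k ∈ range(1, winners+1) and v is truthy.
def sum_lucky_alt (leg_dict : List (Int × Int)) (winners : Int) : Int :=
  leg_dict.foldl
    (fun total kv =>
      if 1 ≤ kv.1 ∧ kv.1 < winners + 1 ∧ kv.2 ≠ 0 then total + kv.2 else total) 0

-- ===== PRECONDITION & SPEC =====
-- Pre_ excludes association lists with duplicate keys: a Python dict always has distinct keys,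
-- so such lists represent no dict input and the first-match convention on them is an artefact.
def Pre_sum_lucky (leg_dict : List (Int × Int)) (winners : Int) : Prop :=
  (leg_dict.map Prod.fst).Nodup
instance (leg_dict : List (Int × Int)) (winners : Int) : Decidable (Pre_sum_lucky leg_dict winners) := by unfold Pre_sum_lucky; infer_instance
def pvWitness_sum_lucky : (List (Int × Int)) × Int := ([(1, 5), (2, 0), (7, 3)], 4)

def Spec_sum_lucky (leg_dict : List (Int × Int)) (winners : Int) (out : Int) : Prop := out = sum_lucky_alt leg_dict winners
instance (leg_dict : List (Int × Int)) (winners : Int) (out : Int) : Decidable (Spec_sum_lucky leg_dict winners out) := by unfold Spec_sum_lucky; infer_instance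

-- ===== CLAIM (what is proved, stated in full; the proofs are below) =====
def Claim_equal_sum_lucky : Prop := ∀ (leg_dict : List (Int × Int)) (winners : Int), Dom_sum_lucky leg_dict winners → Pre_sum_lucky leg_dict winners → Spec_sum_lucky leg_dict winners (sum_lucky leg_dict winners)

-- ===== LEMMAS AND PROOFS =====

-- per-index contribution of A's loop body
def pvG (d : List (Int × Int)) (i : Int) : Int :=
  match d.lookup i with
  | some v => if v ≠ 0 then v else 0
  | none => 0

-- fold of 'acc + φ i' is the sum of the mapped list
theorem pv_foldl_add (φ : Int → Int) : ∀ (L : List Int) (t : Int),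
    L.foldl (fun acc i => acc + φ i) t = t + (L.map φ).sum := by
  intro L
  induction L with
  | nil => intro t; simp
  | cons x xs ih => intro t; simp [List.foldl, ih]; ring

theorem pv_foldl_add_pair (φ : Int × Int → Int) : ∀ (L : List (Int × Int)) (t : Int),
    L.foldl (fun acc kv => acc + φ kv) t = t + (L.map φ).sum := by
  intro L
  induction L with
  | nil => intro t; simp
  | cons x xs ih => intro t; simp [List.foldl, ih]; ring

theorem pv_sum_map_ite (k a : Int) (f : Int → Int) (hf : f k = 0) :
    ∀ (R : List Int), R.Nodup →
      (R.map (fun i => if i = k then a else f i)).sum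
        = (if k ∈ R then a else 0) + (R.map f).sum := by
  intro R
  induction R with
  | nil => simp
  | cons x xs ih =>
    intro hnd
    have hx : x ∉ xs := (List.nodup_cons.mp hnd).1
    have hxs := (List.nodup_cons.mp hnd).2
    by_cases hxk : x = k
    · subst hxk
      have hmap : xs.map (fun i => if i = x then a else f i) = xs.map f := by
        apply List.map_congr_left
        intro j hj
        have : j ≠ x := fun h => hx (h ▸ hj)
        simp [this]
      simp [hmap, hf]
    · have hne : ¬ (k = x) := fun h => hxk h.symm
      simp [ih hxs, hxk, hne]
      ring

theorem pv_main (a b : Int) : ∀ (d : List (Int × Int)),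
    (d.map Prod.fst).Nodup →
    ((PySem.List.pyRange a b 1).map (pvG d)).sum
      = (d.map (fun kv => if a ≤ kv.1 ∧ kv.1 < b ∧ kv.2 ≠ 0 then kv.2 else 0)).sum := by
  intro d
  induction d with
  | nil =>
    have h0 : pvG [] = fun _ => 0 := by funext i; simp [pvG]
    simp [h0]
  | cons kv rest ih =>
    intro hnd
    obtain ⟨k, v⟩ := kv
    have hk : k ∉ rest.map Prod.fst := (List.nodup_cons.mp (by simpa using hnd)).1
    have hrest : (rest.map Prod.fst).Nodup := (List.nodup_cons.mp (by simpa using hnd)).2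
    have hGk : pvG rest k = 0 := by
      have : rest.lookup k = none := by
        rw [List.lookup_eq_none_iff]
        intro a' hmem
        simp only [bne_iff_ne]
        exact fun heq => hk (heq ▸ List.mem_map_of_mem (f := Prod.fst) hmem)
      simp [pvG, this]
    have hcons : ∀ i, pvG ((k, v) :: rest) i
        = if i = k then (if v ≠ 0 then v else 0) else pvG rest i := by
      intro i
      by_cases h : i = k
      · subst h; simp [pvG, List.lookup]
      · have hbe : (i == k) = false := beq_eq_false_iff_ne.mpr h
        simp [pvG, List.lookup, hbe, h]
    calc ((PySem.List.pyRange a b 1).map (pvG ((k, v) :: rest))).sum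
        = ((PySem.List.pyRange a b 1).map
            (fun i => if i = k then (if v ≠ 0 then v else 0) else pvG rest i)).sum :=
          congrArg List.sum (List.map_congr_left (fun i _ => hcons i))
      _ = (if k ∈ PySem.List.pyRange a b 1 then (if v ≠ 0 then v else 0) else 0)
            + ((PySem.List.pyRange a b 1).map (pvG rest)).sum :=
          pv_sum_map_ite k _ (pvG rest) hGk _ (PySem.List.nodup_pyRange_one a b)
      _ = (if a ≤ k ∧ k < b ∧ v ≠ 0 then v else 0)
            + (rest.map (fun kv => if a ≤ kv.1 ∧ kv.1 < b ∧ kv.2 ≠ 0 then kv.2 else 0)).sum := by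
          rw [ih hrest]
          congr 1
          by_cases h1 : a ≤ k <;> by_cases h2 : k < b <;> by_cases h3 : v = 0 <;>
            simp [PySem.List.mem_pyRange_one, h1, h2, h3]
      _ = (((k, v) :: rest).map
            (fun kv => if a ≤ kv.1 ∧ kv.1 < b ∧ kv.2 ≠ 0 then kv.2 else 0)).sum := by
          simp

-- ===== VERDICT (by name: the statement is the Claim_ definition above) =====
theorem sum_lucky_spec : Claim_equal_sum_lucky := by
  intro d w _ hpre
  unfold Spec_sum_lucky sum_lucky sum_lucky_alt
  have hA : ∀ (t : Int), (PySem.List.pyRange 1 (w + 1) 1).foldl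
      (fun total i =>
        match d.lookup i with
        | some v => if v ≠ 0 then total + v else total
        | none => total) t
      = t + ((PySem.List.pyRange 1 (w + 1) 1).map (pvG d)).sum := by
    intro t
    have hstep : (fun (total i : Int) =>
        match d.lookup i with
        | some v => if v ≠ 0 then total + v else total
        | none => total) = fun total i => total + pvG d i := by
      funext total i
      unfold pvG
      cases d.lookup i with
      | none => simp
      | some v => by_cases h : v = 0 <;> simp [h]
    rw [hstep, pv_foldl_add]
  have hB : d.foldl
      (fun total kv => if 1 ≤ kv.1 ∧ kv.1 < w + 1 ∧ kv.2 ≠ 0 then total + kv.2 else total) 0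
      = (d.map (fun kv => if 1 ≤ kv.1 ∧ kv.1 < w + 1 ∧ kv.2 ≠ 0 then kv.2 else 0)).sum := by
    have hstep : (fun (total : Int) (kv : Int × Int) =>
        if 1 ≤ kv.1 ∧ kv.1 < w + 1 ∧ kv.2 ≠ 0 then total + kv.2 else total)
        = fun total kv => total + (if 1 ≤ kv.1 ∧ kv.1 < w + 1 ∧ kv.2 ≠ 0 then kv.2 else 0) := by
      funext total kv
      split_ifs <;> simp
    rw [hstep, pv_foldl_add_pair]
    simp
  by_cases hd : d = []
  · subst hd; simp
  · simp only [hd, if_false]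
    rw [hA, hB, zero_add]
    exact pv_main 1 (w + 1) d hpre
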